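-- pv_equiv track=rewrite | github.com/carjo422/hockeystats | functions.py | get_td_content
-- ===== SOURCE A (Python) =====
-- def get_td_content(string):
--
--     content = []
--
--     for j in range(1,len(string)-5):
--         if string[j].lower() == ">":
--
--             tag_start = 0
--             k=0
--
--             while tag_start == 0:
--                 k=k+1
--
--                 if j+k >= len(string):
--                     tag_start = 1
--                 else:
--                     if string[j+k] == "<":
--                         tag_start = 1
--
--             if k > 1:
--                 content.append(string[j+1:j+k])
--
--     return content
-- ===== SOURCE B (Python) =====
-- def get_td_content(string):
--     # One backward pass precomputes, for every position i, the index of the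
--     # next '<' at or after i (or len(string) if none); each '>' then yields
--     # its content by a direct slice -- O(n + output) instead of A's O(n^2).
--     n = len(string)
--     nxt = [n] * (n + 1)
--     for i in range(n - 1, -1, -1):
--         nxt[i] = i if string[i] == "<" else nxt[i + 1]
--     content = []
--     for j in range(1, n - 5):
--         if string[j] == ">":
--             e = nxt[j + 1]
--             if e > j + 1:
--                 content.append(string[j + 1:e])
--     return content
-- ===== Notes on version B (the rewrite author's own statement) =====
-- stated objective: alternative
-- what changed: A rescans forward from every '>' to locate the following '<'; B instead precomputes a next-'<' index array in one backward pass and takes a direct slice per '>'.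
import Mathlib
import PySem

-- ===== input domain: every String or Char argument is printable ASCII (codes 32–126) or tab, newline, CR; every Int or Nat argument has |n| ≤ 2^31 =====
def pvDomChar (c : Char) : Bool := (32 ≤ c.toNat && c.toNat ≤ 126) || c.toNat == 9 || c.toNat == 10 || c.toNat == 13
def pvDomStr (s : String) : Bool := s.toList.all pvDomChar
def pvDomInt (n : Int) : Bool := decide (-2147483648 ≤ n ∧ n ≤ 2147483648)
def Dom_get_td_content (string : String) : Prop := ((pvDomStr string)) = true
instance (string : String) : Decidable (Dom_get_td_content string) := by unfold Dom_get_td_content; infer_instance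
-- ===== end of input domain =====

-- B replaces A's per-'>' forward rescan for the next '<' by one backward precomputation pass (objective: alternative).

-- ===== PORT A =====
-- inner while-loop of A: from counter k, returns the final k (first k' > k with j+k' past the end or s[j+k'] = '<');
-- the index s[j+k'] is only read when j+k' < s.length, so getD with a default is exact there
def pvFindK (s : List Char) (j k : Nat) : Nat :=
  if h : s.length ≤ j + (k + 1) then k + 1
  else if s.getD (j + (k + 1)) ' ' = '<' then k + 1
  else pvFindK s j (k + 1)
termination_by s.length - (j + k)
decreasing_by omega

def get_td_content (string : String) : List String :=
  let s := string.toList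
  -- for j in range(1, len(string)-5); string[j] is always in range there, so pyGetD is exact
  (PySem.List.pyRange 1 ((s.length : Int) - 5)).foldl
    (fun content j =>
      if PySem.Chars.lowerChar (PySem.List.pyGetD s j ' ') = '>' then
        if 1 < pvFindK s j.toNat 0 then
          content ++ [String.ofList (PySem.List.slice s (some (j + 1)) (some (j + (pvFindK s j.toNat 0 : Int))))]
        else content
      else content) []

-- ===== PORT B =====
-- Source B's backward fill of nxt: pvNexts s i is the nxt array of suffix s at absolute offset i
-- (entry d = smallest absolute index ≥ i+d holding '<', else i + s.length); length s.length + 1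
def pvNexts (s : List Char) (i : Nat) : List Nat :=
  match s with
  | [] => [i]
  | c :: rest =>
    let tail := pvNexts rest (i + 1)
    (if c = '<' then i else tail.headD i) :: tail

def get_td_content_alt (string : String) : List String :=
  let s := string.toList
  let n := s.length
  let nxt := pvNexts s 0
  (PySem.List.pyRange 1 ((n : Int) - 5)).foldl
    (fun content j =>
      if PySem.List.pyGetD s j ' ' = '>' then
        if j + 1 < ((nxt.getD (j.toNat + 1) n : Nat) : Int) then
          content ++ [String.ofList (PySem.List.slice s (some (j + 1)) (some ((nxt.getD (j.toNat + 1) n : Nat) : Int)))]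
        else content
      else content) []

-- ===== PRECONDITION & SPEC =====
def Spec_get_td_content (string : String) (out : List String) : Prop := out = get_td_content_alt string
instance (string : String) (out : List String) : Decidable (Spec_get_td_content string out) := by unfold Spec_get_td_content; infer_instance

-- ===== CLAIM (what is proved, stated in full; the proofs are below) =====
def Claim_equal_get_td_content : Prop := ∀ (string : String), Dom_get_td_content string → Spec_get_td_content string (get_td_content string)

-- ===== LEMMAS AND PROOFS =====

-- str.lower() of a single character equals '>' exactly when the character is '>'
theorem pv_lowerChar_gt (c : Char) : (PySem.Chars.lowerChar c = '>') = (c = '>') := by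
  unfold PySem.Chars.lowerChar
  split_ifs with h
  · simp only [PySem.Chars.isupper, Bool.and_eq_true, decide_eq_true_eq, Char.le_def,
      UInt32.le_iff_toNat_le] at h
    have ha : ('A').val.toNat = 65 := by decide
    have hz : ('Z').val.toNat = 90 := by decide
    have hgt : ('>').toNat = 62 := by decide
    rw [ha, hz] at h
    apply propext
    constructor
    · intro he
      have h62 := congrArg Char.toNat he
      rw [Char.toNat_ofNat] at h62
      have hvalid : (c.toNat + 32).isValidChar :=
        Or.inl (show c.toNat + 32 < 55296 by change c.val.toNat + 32 < 55296; omega)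
      rw [if_pos hvalid, hgt] at h62
      exfalso
      change c.val.toNat + 32 = 62 at h62
      omega
    · intro he; subst he
      exfalso
      exact absurd h (by decide)
  · rfl

-- the nxt array entry d is (offset) + d + distance from d to the first '<' in the suffix
theorem pv_pvNexts_getD (s : List Char) (i d dflt : Nat) (h : d ≤ s.length) :
    (pvNexts s i).getD d dflt = i + d + (s.drop d).findIdx (fun c => c == '<') := by
  induction s generalizing i d with
  | nil =>
    have hd0 : d = 0 := by simpa using h
    subst hd0
    simp [pvNexts]
  | cons c rest ih =>
    cases d with
    | zero =>
      by_cases hc : c = '<'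
      · simp [pvNexts, hc, List.findIdx_cons]
      · have hhd : (pvNexts rest (i + 1)).headD i = (pvNexts rest (i + 1)).getD 0 dflt := by
          cases hr : pvNexts rest (i + 1) with
          | nil => cases rest <;> simp [pvNexts] at hr
          | cons x xs => simp
        rw [show pvNexts (c :: rest) i
            = (if c = '<' then i else (pvNexts rest (i + 1)).headD i) :: pvNexts rest (i + 1) from rfl]
        rw [List.getD_cons_zero, if_neg hc, hhd, ih (i + 1) 0 (by omega)]
        simp only [List.drop_zero, List.findIdx_cons]
        have hb : (c == '<') = false := by simpa using hc
        rw [hb, cond_false]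
        omega
    | succ d' =>
      rw [show pvNexts (c :: rest) i
          = (if c = '<' then i else (pvNexts rest (i + 1)).headD i) :: pvNexts rest (i + 1) from rfl]
      rw [List.getD_cons_succ, List.drop_succ_cons, ih (i + 1) d' (by simpa using h)]
      omega

-- the while loop of A walks to the first '<' strictly after j+k, clamped at the end of the string
theorem pv_pvFindK_eq (s : List Char) (j k : Nat) :
    pvFindK s j k = k + 1 + min (s.length - (j + k + 1)) ((s.drop (j + k + 1)).findIdx (fun c => c == '<')) := by
  fun_induction pvFindK s j k with
  | case1 k h =>
    have : s.length - (j + k + 1) = 0 := by omega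
    simp [this]
  | case2 k h hc =>
    have hlt : j + k + 1 < s.length := by omega
    have hd : s.drop (j + k + 1) = s[j + k + 1] :: s.drop (j + k + 2) := List.drop_eq_getElem_cons hlt
    have hg : s[j + k + 1] = '<' := by
      rw [← hc]; exact (List.getD_eq_getElem s ' ' hlt).symm
    have hb : (s[j + k + 1] == '<') = true := by simp [hg]
    rw [hd, List.findIdx_cons, hb, cond_true]
    omega
  | case3 k h hc ih =>
    have hlt : j + k + 1 < s.length := by omega
    have hd : s.drop (j + k + 1) = s[j + k + 1] :: s.drop (j + k + 2) := List.drop_eq_getElem_cons hlt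
    have hg : ¬ s[j + k + 1] = '<' := by
      rw [← List.getD_eq_getElem s ' ' hlt]; exact hc
    have hb : (s[j + k + 1] == '<') = false := by simp [hg]
    have hidx : j + (k + 1) + 1 = j + k + 2 := by omega
    rw [hidx] at ih
    rw [ih, hd, List.findIdx_cons, hb, cond_false]
    omega

-- ===== VERDICT (by name: the statement is the Claim_ definition above) =====
theorem get_td_content_spec : Claim_equal_get_td_content := by
  intro string _
  unfold Spec_get_td_content get_td_content get_td_content_alt
  apply PySem.List.foldl_congr_mem
  intro acc j hj
  rw [PySem.List.mem_pyRange_one] at hj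
  obtain ⟨h1, h2⟩ := hj
  have hj0 : 0 ≤ j := by omega
  have hjn : j = (j.toNat : Int) := (Int.toNat_of_nonneg hj0).symm
  have hlen : j.toNat + 6 ≤ string.toList.length := by omega
  set s := string.toList with hs
  set jn := j.toNat with hjndef
  set F := (s.drop (jn + 1)).findIdx (fun c => c == '<') with hF
  have hFle : F ≤ s.length - (jn + 1) := by
    have := List.findIdx_le_length (p := fun c => c == '<') (xs := s.drop (jn + 1))
    simpa using this
  have hk : pvFindK s jn 0 = 1 + F := by
    rw [pv_pvFindK_eq]
    simp only [Nat.zero_add, Nat.add_zero]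
    omega
  have he : (pvNexts s 0).getD (jn + 1) s.length = jn + 1 + F := by
    rw [pv_pvNexts_getD s 0 (jn + 1) s.length (by omega)]
    omega
  rw [hjn, PySem.List.pyGetD_natCast]
  simp only [pv_lowerChar_gt]
  by_cases hc : s.getD jn ' ' = '>'
  · rw [if_pos hc, if_pos hc, hk, he]
    have hcast : (((jn : Int)) + 1 < ((jn + 1 + F : Nat) : Int)) ↔ 1 < 1 + F := by
      push_cast; omega
    by_cases hF1 : 1 < 1 + F
    · rw [if_pos hF1, if_pos (hcast.mpr hF1)]
      have harg : (jn : Int) + ((1 + F : Nat) : Int) = ((jn + 1 + F : Nat) : Int) := by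
        push_cast; ring
      rw [harg]
    · rw [if_neg hF1, if_neg (fun hx => hF1 (hcast.mp hx))]
  · rw [if_neg hc, if_neg hc]
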